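-- pv_equiv track=rewrite | github.com/XPZhangc/hsbchomework | llm_based_generator/src/generator/llm_generator.py | _get_demand_category_distribution
-- ===== SOURCE A (Python) =====
-- from typing import List, Dict, Any, Optional
--
-- def _get_demand_category_distribution(demands: List[str],
--                                       demands_by_category: Dict[str, List[str]]) -> Dict[str, int]:
--     """获取需求类别分布"""
--     distribution = {}
--     category_map = {}
--     for category, category_demands in demands_by_category.items():
--         for demand in category_demands:
--             category_map[demand] = category
--
--     for demand in demands:
--         # 查找需求所属类别
--         category = 'other'
--         for cat, cat_demands in demands_by_category.items():
--             if any(cat_d in demand for cat_d in cat_demands):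
--                 category = cat
--                 break
--
--         distribution[category] = distribution.get(category, 0) + 1
--
--     return distribution
-- ===== SOURCE B (Python) =====
-- def _get_demand_category_distribution(demands, demands_by_category):
--     """获取需求类别分布"""
--     # Different algorithm: hash every pattern once to the index of the first
--     # category owning it, then label each demand by the minimum category index
--     # found among the demand's own substrings in that hash table -- no scan
--     # over the pattern set per demand.
--     cats = list(demands_by_category)
--     pat_index = {}
--     for i, pats in enumerate(demands_by_category.values()):
--         for p in pats:
--             pat_index.setdefault(p, i)
--     distribution = {}
--     for demand in demands:
--         n = len(demand)
--         best = min((pat_index[demand[j:k]]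
--                     for j in range(n + 1)
--                     for k in range(j, n + 1)
--                     if demand[j:k] in pat_index),
--                    default=None)
--         label = cats[best] if best is not None else 'other'
--         distribution[label] = distribution.get(label, 0) + 1
--     return distribution
-- ===== Notes on version B (the rewrite author's own statement) =====
-- stated objective: alternative
-- what changed: B builds a hash table mapping every pattern to the index of the first category owning it, then labels each demand by the minimum category index found among the demand's own substrings in that table (substring-enumeration lookup instead of scanning the pattern set per demand), counting labels as it goes.
import Mathlib
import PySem

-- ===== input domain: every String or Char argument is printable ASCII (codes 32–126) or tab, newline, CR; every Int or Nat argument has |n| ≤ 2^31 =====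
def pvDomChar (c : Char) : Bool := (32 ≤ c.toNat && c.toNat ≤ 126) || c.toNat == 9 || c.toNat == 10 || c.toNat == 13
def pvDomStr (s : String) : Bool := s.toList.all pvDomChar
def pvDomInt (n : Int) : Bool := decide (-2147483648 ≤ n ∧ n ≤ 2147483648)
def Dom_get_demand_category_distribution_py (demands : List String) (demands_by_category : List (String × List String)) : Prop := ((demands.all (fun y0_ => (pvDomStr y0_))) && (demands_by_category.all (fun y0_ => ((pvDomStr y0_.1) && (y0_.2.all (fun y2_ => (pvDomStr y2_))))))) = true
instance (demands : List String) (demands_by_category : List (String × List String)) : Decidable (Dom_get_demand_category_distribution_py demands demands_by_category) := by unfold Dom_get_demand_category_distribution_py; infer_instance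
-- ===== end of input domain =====

-- B hashes every pattern once to the index of the first category owning it, then labels each
-- demand by the minimum category index among its own substrings looked up in that table
-- (alternative algorithm: no scan over the pattern set per demand).


-- ===== PORT A =====
-- the inner 'for cat, cat_demands … if any(…): category = cat; break' loop (category starts as 'other')
def pvAFindCat (cats : List (String × List String)) (demand : String) : String :=
  match cats with
  | [] => "other"
  | (cat, cat_demands) :: rest =>
      if cat_demands.any (fun cat_d => PySem.Str.isIn cat_d demand) then cat
      else pvAFindCat rest demand

def get_demand_category_distribution_py (demands : List String) (demands_by_category : List (String × List String)) : List (String × Int) :=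
  -- category_map is built exactly as in A and, as in A, never read afterwards
  let _category_map : PySem.Dict String String :=
    demands_by_category.foldl
      (fun m cp => cp.2.foldl (fun m demand => m.insert demand cp.1) m) PySem.Dict.empty
  let distribution : PySem.Dict String Int :=
    demands.foldl
      (fun distribution demand =>
        let category := pvAFindCat demands_by_category demand
        distribution.insert category (distribution.getD category 0 + 1))
      PySem.Dict.empty
  distribution.items

-- ===== PORT B =====
-- pat_index: every pattern → index of the first category list containing it (setdefault keeps the first)
def pvBPatIndex (demands_by_category : List (String × List String)) : PySem.Dict String Int :=
  (PySem.List.enumerate (demands_by_category.map (fun cp => cp.2)) 0).foldl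
    (fun pat_index ip => ip.2.foldl (fun pat_index p => pat_index.setdefault p ip.1) pat_index)
    PySem.Dict.empty

-- all slices demand[j:k], j in range(n+1), k in range(j, n+1)
def pvBSubs (demand : String) : List String :=
  (PySem.List.pyRange 0 (PySem.Str.len demand + 1) 1).flatMap (fun j =>
    (PySem.List.pyRange j (PySem.Str.len demand + 1) 1).map (fun k =>
      PySem.Str.slice demand (some j) (some k)))

-- min((pat_index[sub] for sub in slices if sub in pat_index), default=None); then cats[best] / 'other'
def pvBLabel (cats : List String) (pat_index : PySem.Dict String Int) (demand : String) : String :=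
  match PySem.List.min? ((pvBSubs demand).filterMap (fun s => pat_index.get? s)) (fun x => x) with
  | some best => PySem.List.pyGetD cats best ""
  | none => "other"

def get_demand_category_distribution_py_alt (demands : List String) (demands_by_category : List (String × List String)) : List (String × Int) :=
  let cats := demands_by_category.map (fun cp => cp.1)
  let pat_index := pvBPatIndex demands_by_category
  (demands.foldl
      (fun distribution demand =>
        let label := pvBLabel cats pat_index demand
        distribution.insert label (distribution.getD label 0 + 1))
      PySem.Dict.empty).items

-- ===== PRECONDITION & SPEC =====
def Spec_get_demand_category_distribution_py (demands : List String) (demands_by_category : List (String × List String)) (out : List (String × Int)) : Prop := out = get_demand_category_distribution_py_alt demands demands_by_category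
instance (demands : List String) (demands_by_category : List (String × List String)) (out : List (String × Int)) : Decidable (Spec_get_demand_category_distribution_py demands demands_by_category out) := by unfold Spec_get_demand_category_distribution_py; infer_instance

-- ===== CLAIM (what is proved, stated in full; the proofs are below) =====
def Claim_equal_get_demand_category_distribution_py : Prop := ∀ (demands : List String) (demands_by_category : List (String × List String)), Dom_get_demand_category_distribution_py demands demands_by_category → Spec_get_demand_category_distribution_py demands demands_by_category (get_demand_category_distribution_py demands demands_by_category)

-- ===== LEMMAS AND PROOFS =====

-- one pattern list folded with setdefault: lookup = old value, else the shared index if the key occurs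
theorem pv_setdefault_fold (l : List String) (i : Int) (q : String) :
    ∀ m : PySem.Dict String Int,
      (l.foldl (fun m p => m.setdefault p i) m).get? q
        = (m.get? q).or (if q ∈ l then some i else none) := by
  induction l with
  | nil => intro m; simp
  | cons p l ih =>
      intro m
      simp only [List.foldl_cons, ih]
      by_cases hq : q = p
      · subst hq
        rw [PySem.Dict.get?_setdefault_self]
        cases h : m.get? q <;> simp
      · rw [PySem.Dict.get?_setdefault_of_ne _ _ hq]
        simp [hq]

-- the whole enumerate/setdefault build: lookup q = start + first list index containing q
theorem pv_patIndex_fold (ls : List (List String)) (q : String) :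
    ∀ (s : Int) (m : PySem.Dict String Int),
      ((PySem.List.enumerate ls s).foldl
          (fun m ip => ip.2.foldl (fun m p => m.setdefault p ip.1) m) m).get? q
        = (m.get? q).or ((List.findIdx? (fun l => l.contains q) ls).map (fun k : Nat => s + (k : Int))) := by
  induction ls with
  | nil => intro s m; simp [PySem.List.enumerate]
  | cons l ls ih =>
      intro s m
      rw [PySem.List.enumerate_cons, List.foldl_cons, ih, pv_setdefault_fold, List.findIdx?_cons]
      by_cases hq : q ∈ l
      · simp [hq]
      · simp only [List.contains_eq_mem, hq, decide_false, Bool.false_eq_true, if_false,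
          Option.or_none]
        cases h : List.findIdx? (fun l => decide (q ∈ l)) ls with
        | none => simp
        | some k =>
            have e : s + 1 + (k : Int) = s + ((k : Int) + 1) := by ring
            simp [e]

theorem pv_patIndex_get? (cats : List (String × List String)) (q : String) :
    (pvBPatIndex cats).get? q
      = (List.findIdx? (fun cp => cp.2.contains q) cats).map (fun k : Nat => (k : Int)) := by
  rw [pvBPatIndex, pv_patIndex_fold, PySem.Dict.get?_empty, Option.none_or, List.findIdx?_map]
  simp [Function.comp_def]

-- the enumerated slices of a string are exactly its infixes
theorem pv_mem_subs (demand s : String) :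
    s ∈ pvBSubs demand ↔ s.toList <:+: demand.toList := by
  constructor
  · intro h
    rw [pvBSubs, List.mem_flatMap] at h
    obtain ⟨j, hj, hmem⟩ := h
    rw [List.mem_map] at hmem
    obtain ⟨k, hk, rfl⟩ := hmem
    rw [PySem.List.mem_pyRange_one] at hj hk
    have hj0 : 0 ≤ j := hj.1
    have hk0 : 0 ≤ k := le_trans hj0 hk.1
    have htl : (PySem.Str.slice demand (some j) (some k)).toList
        = (demand.toList.drop j.toNat).take (k.toNat - j.toNat) := by
      rw [PySem.Str.toList_slice, PySem.Chars.slice_eq_listSlice,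
        PySem.List.slice_toNat _ hj0 hk0]
    rw [htl]
    exact ((List.take_prefix _ _).isInfix).trans ((List.drop_suffix _ _).isInfix)
  · intro h
    obtain ⟨t, u, ht⟩ := h
    rw [pvBSubs, List.mem_flatMap]
    have hlen : t.length + s.toList.length + u.length = demand.toList.length := by
      rw [← ht]; simp; omega
    refine ⟨(t.length : Int), ?_, ?_⟩
    · rw [PySem.List.mem_pyRange_one]
      simp only [PySem.Str.len_eq]
      omega
    · rw [List.mem_map]
      refine ⟨(t.length : Int) + (s.toList.length : Int), ?_, ?_⟩
      · rw [PySem.List.mem_pyRange_one]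
        simp only [PySem.Str.len_eq]
        omega
      · apply String.toList_inj.mp
        rw [PySem.Str.toList_slice, PySem.Chars.slice_eq_listSlice,
          PySem.List.slice_natCast_add, ← ht]
        rw [List.append_assoc, List.drop_left, List.take_left]

-- A's first-match scan, characterised by findIdx?
theorem pvAFindCat_eq_findIdx? (cats : List (String × List String)) (demand : String) :
    pvAFindCat cats demand
      = match List.findIdx? (fun cp => cp.2.any (fun p => PySem.Str.isIn p demand)) cats with
        | some M => (cats.map (fun cp => cp.1)).getD M ""
        | none => "other" := by
  induction cats with
  | nil => rfl
  | cons c cs ih =>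
      rw [List.findIdx?_cons]
      by_cases hc : c.2.any (fun p => PySem.Str.isIn p demand) = true
      · obtain ⟨cat, pats⟩ := c
        simp only [pvAFindCat, hc, if_true]
        rfl
      · obtain ⟨cat, pats⟩ := c
        simp only [pvAFindCat] at *
        rw [if_neg hc, if_neg hc, ih]
        cases List.findIdx? (fun cp => cp.2.any fun p => PySem.Str.isIn p demand) cs <;> simp

-- per-demand: B's substring-hash labelling equals A's first-match scan
theorem pv_label_eq (cats : List (String × List String)) (demand : String) :
    pvBLabel (cats.map (fun cp => cp.1)) (pvBPatIndex cats) demand = pvAFindCat cats demand := by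
  have hcand : ∀ x : Int,
      x ∈ (pvBSubs demand).filterMap (fun s => (pvBPatIndex cats).get? s) ↔
      ∃ k : Nat, x = (k : Int) ∧ ∃ s : String, s.toList <:+: demand.toList ∧
        List.findIdx? (fun cp => cp.2.contains s) cats = some k := by
    intro x
    rw [List.mem_filterMap]
    constructor
    · rintro ⟨s, hs, hget⟩
      rw [pv_patIndex_get?] at hget
      obtain ⟨k, hk, hxk⟩ := Option.map_eq_some_iff.mp hget
      exact ⟨k, hxk.symm, s, (pv_mem_subs demand s).mp hs, hk⟩
    · rintro ⟨k, rfl, s, hsin, hfind⟩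
      exact ⟨s, (pv_mem_subs demand s).mpr hsin, by rw [pv_patIndex_get?, hfind]; rfl⟩
  rw [pvAFindCat_eq_findIdx?]
  cases hF : List.findIdx? (fun cp => cp.2.any (fun p => PySem.Str.isIn p demand)) cats with
  | none =>
      have hnone := List.findIdx?_eq_none_iff.mp hF
      have hempty : (pvBSubs demand).filterMap (fun s => (pvBPatIndex cats).get? s) = [] := by
        rw [List.eq_nil_iff_forall_not_mem]
        intro x hx
        obtain ⟨k, rfl, s, hsin, hfind⟩ := (hcand x).mp hx
        obtain ⟨hklen, hfi⟩ := List.findIdx?_eq_some_iff_findIdx_eq.mp hfind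
        subst hfi
        have hc : cats[List.findIdx (fun cp => cp.2.contains s) cats].2.contains s = true :=
          List.findIdx_getElem (w := hklen)
        have hPk : cats[List.findIdx (fun cp => cp.2.contains s) cats].2.any
            (fun p => PySem.Str.isIn p demand) = true := by
          rw [List.any_eq_true]
          exact ⟨s, by simpa using hc, (PySem.Str.isIn_iff_infix s demand).mpr hsin⟩
        have hfalse := hnone _ (List.getElem_mem hklen)
        rw [hfalse] at hPk
        exact absurd hPk (by simp)
      rw [pvBLabel, hempty]
      have : PySem.List.min? ([] : List Int) (fun x => x) = none :=
        (PySem.List.min?_eq_none_iff _ _).mpr rfl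
      rw [this]
  | some M =>
      obtain ⟨hMlen, hMfi⟩ := List.findIdx?_eq_some_iff_findIdx_eq.mp hF
      subst hMfi
      set M := List.findIdx (fun cp => cp.2.any (fun p => PySem.Str.isIn p demand)) cats with hMdef
      have hPM : cats[M].2.any (fun p => PySem.Str.isIn p demand) = true :=
        List.findIdx_getElem (w := hMlen)
      have hmin : ∀ j, j < M → ∀ (hj : j < cats.length),
          cats[j].2.any (fun p => PySem.Str.isIn p demand) = false := by
        intro j hj hjl
        exact List.not_of_lt_findIdx hj
      -- (a) M itself is a candidate value
      have hMc : (M : Int) ∈ (pvBSubs demand).filterMap (fun s => (pvBPatIndex cats).get? s) := by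
        obtain ⟨p, hpmem, hpin⟩ := List.any_eq_true.mp hPM
        have hex : ∃ cp ∈ cats, cp.2.contains p = true :=
          ⟨cats[M], List.getElem_mem hMlen, by simpa using hpmem⟩
        have hGfind := List.findIdx?_eq_some_of_exists hex
        set G := List.findIdx (fun cp => cp.2.contains p) cats with hGdef
        have hGlen : G < cats.length := List.findIdx_lt_length.mpr hex
        have hGc : cats[G].2.contains p = true :=
          List.findIdx_getElem (w := hGlen)
        have hGle : G ≤ M := by
          by_contra hlt
          have hMG : M < G := by omega
          have hfalse := List.not_of_lt_findIdx (xs := cats) hMG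
          simp only [List.contains_eq_mem, decide_eq_false_iff_not] at hfalse
          exact hfalse hpmem
        have hPG : cats[G].2.any (fun q => PySem.Str.isIn q demand) = true := by
          rw [List.any_eq_true]
          exact ⟨p, by simpa using hGc, hpin⟩
        have hGM : G = M := by
          by_contra hne
          have := hmin G (by omega) hGlen
          rw [this] at hPG
          exact absurd hPG (by simp)
        rw [(hcand (M : Int))]
        exact ⟨M, rfl, p, (PySem.Str.isIn_iff_infix p demand).mp hpin, by rw [← hGM]; exact hGfind⟩
      -- (b) every candidate value is ≥ M
      have hlb : ∀ x ∈ (pvBSubs demand).filterMap (fun s => (pvBPatIndex cats).get? s),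
          (M : Int) ≤ x := by
        intro x hx
        obtain ⟨k, rfl, s, hsin, hfind⟩ := (hcand x).mp hx
        obtain ⟨hklen, hkfi⟩ := List.findIdx?_eq_some_iff_findIdx_eq.mp hfind
        subst hkfi
        have hc : cats[List.findIdx (fun cp => cp.2.contains s) cats].2.contains s = true :=
          List.findIdx_getElem (w := hklen)
        have hPk : cats[List.findIdx (fun cp => cp.2.contains s) cats].2.any
            (fun p => PySem.Str.isIn p demand) = true := by
          rw [List.any_eq_true]
          exact ⟨s, by simpa using hc, (PySem.Str.isIn_iff_infix s demand).mpr hsin⟩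
        have hnlt : ¬ List.findIdx (fun cp => cp.2.contains s) cats < M := by
          intro hlt
          rw [hmin _ hlt hklen] at hPk
          exact absurd hPk (by simp)
        exact_mod_cast Nat.le_of_not_lt hnlt
      -- (c) so the minimum candidate is exactly M
      have hminEq : PySem.List.min?
          ((pvBSubs demand).filterMap (fun s => (pvBPatIndex cats).get? s)) (fun x => x)
          = some (M : Int) := by
        cases hm : PySem.List.min?
            ((pvBSubs demand).filterMap (fun s => (pvBPatIndex cats).get? s)) (fun x => x) with
        | none =>
            have := (PySem.List.min?_eq_none_iff _ _).mp hm
            rw [this] at hMc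
            exact absurd hMc (by simp)
        | some m =>
            have hm1 : m ≤ (M : Int) := PySem.List.min?_isMin hm _ hMc
            have hm2 : (M : Int) ≤ m := hlb m (PySem.List.min?_mem hm)
            rw [le_antisymm hm1 hm2]
      rw [pvBLabel, hminEq]
      simp

-- ===== VERDICT (by name: the statement is the Claim_ definition above) =====
theorem get_demand_category_distribution_py_spec : Claim_equal_get_demand_category_distribution_py := by
  intro demands demands_by_category _
  show _ = _
  simp only [get_demand_category_distribution_py, get_demand_category_distribution_py_alt,
    pv_label_eq]
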